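-- pv_equiv track=rewrite | github.com/Anneroos/AdventOfCode | 2016/Day7.py | untangleIP
-- ===== SOURCE A (Python) =====
-- def untangleIP(ip):
--     realip = ""
--     hypernet = ""
--     brackets = 0
--     for i in ip:
--         if i == "[":
--             brackets += 1
--             realip += " "
--         elif i == "]":
--             brackets -=1
--             hypernet += " "
--         elif brackets == 0:
--             realip += i
--         else:
--             hypernet += i
--     return realip, hypernet
-- ===== SOURCE B (Python) =====
-- def untangleIP(ip):
--     # table-then-two-passes: precompute bracket depth before each char, then
--     # select supernet and hypernet characters in two independent passes
--     depths = [0]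
--     for c in ip:
--         depths.append(depths[-1] + (c == "[") - (c == "]"))
--     realip = "".join(" " if c == "[" else c
--                      for c, d in zip(ip, depths)
--                      if c == "[" or (c != "]" and d == 0))
--     hypernet = "".join(" " if c == "]" else c
--                        for c, d in zip(ip, depths)
--                        if c == "]" or (c != "[" and d != 0))
--     return realip, hypernet
-- ===== Notes on version B (the rewrite author's own statement) =====
-- stated objective: alternative
-- what changed: Replaces the single interleaved routing loop with a precomputed prefix bracket-depth table followed by two independent filter/select passes (one for supernet, one for hypernet).
import Mathlib
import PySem

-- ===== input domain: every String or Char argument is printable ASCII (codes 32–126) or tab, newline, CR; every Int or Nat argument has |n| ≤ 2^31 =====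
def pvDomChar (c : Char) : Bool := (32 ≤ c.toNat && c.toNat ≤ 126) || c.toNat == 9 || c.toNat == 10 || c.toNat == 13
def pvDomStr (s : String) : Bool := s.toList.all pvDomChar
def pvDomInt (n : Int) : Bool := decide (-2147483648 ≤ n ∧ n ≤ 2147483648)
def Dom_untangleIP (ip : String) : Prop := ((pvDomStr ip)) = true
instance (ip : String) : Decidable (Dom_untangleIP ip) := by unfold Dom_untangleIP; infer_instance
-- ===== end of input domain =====

-- B replaces A's single interleaved routing loop by a prefix bracket-depth table
-- plus two independent selection passes; same cost, different decomposition.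

-- ===== PORT A =====
-- A's loop: state (realip, hypernet, brackets); strings kept as List Char, joined at the end.
def untangleIP (ip : String) : String × String :=
  let r := ip.toList.foldl
    (fun (st : List Char × List Char × Int) i =>
      if i = '[' then (st.1 ++ [' '], st.2.1, st.2.2 + 1)
      else if i = ']' then (st.1, st.2.1 ++ [' '], st.2.2 - 1)
      else if st.2.2 = 0 then (st.1 ++ [i], st.2.1, st.2.2)
      else (st.1, st.2.1 ++ [i], st.2.2))
    ([], [], 0)
  (String.mk r.1, String.mk r.2.1)

-- ===== PORT B =====
-- depths[k] = bracket depth BEFORE character k (B's `depths` list, truncated by zip)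
def pvDepths (d : Int) : List Char → List Int
  | [] => []
  | c :: cs => d :: pvDepths (d + (if c = '[' then 1 else 0) - (if c = ']' then 1 else 0)) cs

def untangleIP_alt (ip : String) : String × String :=
  let cs := ip.toList
  let pairs := cs.zip (pvDepths 0 cs)
  let realip := (pairs.filter (fun p => p.1 == '[' || (p.1 != ']' && p.2 == 0))).map
      (fun p => if p.1 = '[' then ' ' else p.1)
  let hypernet := (pairs.filter (fun p => p.1 == ']' || (p.1 != '[' && p.2 != 0))).map
      (fun p => if p.1 = ']' then ' ' else p.1)
  (String.mk realip, String.mk hypernet)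

-- ===== PRECONDITION & SPEC =====
def Spec_untangleIP (ip : String) (out : String × String) : Prop := out = untangleIP_alt ip
instance (ip : String) (out : String × String) : Decidable (Spec_untangleIP ip out) := by unfold Spec_untangleIP; infer_instance

-- ===== CLAIM (what is proved, stated in full; the proofs are below) =====
def Claim_equal_untangleIP : Prop := ∀ (ip : String), Dom_untangleIP ip → Spec_untangleIP ip (untangleIP ip)

-- ===== LEMMAS AND PROOFS =====

def pvStep (st : List Char × List Char × Int) (i : Char) : List Char × List Char × Int :=
  if i = '[' then (st.1 ++ [' '], st.2.1, st.2.2 + 1)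
  else if i = ']' then (st.1, st.2.1 ++ [' '], st.2.2 - 1)
  else if st.2.2 = 0 then (st.1 ++ [i], st.2.1, st.2.2)
  else (st.1, st.2.1 ++ [i], st.2.2)

def pvReal (d : Int) (cs : List Char) : List Char :=
  ((cs.zip (pvDepths d cs)).filter (fun p => p.1 == '[' || (p.1 != ']' && p.2 == 0))).map
    (fun p => if p.1 = '[' then ' ' else p.1)

def pvHyper (d : Int) (cs : List Char) : List Char :=
  ((cs.zip (pvDepths d cs)).filter (fun p => p.1 == ']' || (p.1 != '[' && p.2 != 0))).map
    (fun p => if p.1 = ']' then ' ' else p.1)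


theorem pv_main (cs : List Char) (r h : List Char) (d : Int) :
    (cs.foldl pvStep (r, h, d)).1 = r ++ pvReal d cs ∧
    (cs.foldl pvStep (r, h, d)).2.1 = h ++ pvHyper d cs := by
  induction cs generalizing r h d with
  | nil => simp [pvReal, pvHyper, pvDepths]
  | cons c cs ih =>
    simp only [List.foldl_cons]
    by_cases hb : c = '['
    · subst hb
      simp only [pvStep]
      rcases ih (r ++ [' ']) h (d + 1) with ⟨h1, h2⟩
      refine ⟨?_, ?_⟩ <;> simp [h1, h2, pvReal, pvHyper, pvDepths]
    · by_cases hc : c = ']'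
      · subst hc
        simp only [pvStep]
        simp only [if_true]
        rcases ih r (h ++ [' ']) (d - 1) with ⟨h1, h2⟩
        refine ⟨?_, ?_⟩ <;> simp [h1, h2, pvReal, pvHyper, pvDepths, hb]
      · by_cases hd : d = 0
        · subst hd
          simp only [pvStep, if_neg hb, if_neg hc]
          rcases ih (r ++ [c]) h 0 with ⟨h1, h2⟩
          refine ⟨?_, ?_⟩ <;> simp [h1, h2, pvReal, pvHyper, pvDepths, hb, hc]
        · simp only [pvStep, if_neg hb, if_neg hc, if_neg hd]
          rcases ih r (h ++ [c]) d with ⟨h1, h2⟩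
          refine ⟨?_, ?_⟩ <;> simp [h1, h2, pvReal, pvHyper, pvDepths, hb, hc, hd]

-- ===== VERDICT (by name: the statement is the Claim_ definition above) =====
theorem untangleIP_spec : Claim_equal_untangleIP := by
  intro ip _
  show (untangleIP ip) = untangleIP_alt ip
  unfold untangleIP untangleIP_alt
  rcases pv_main ip.toList [] [] 0 with ⟨h1, h2⟩
  simp only [show (fun (st : List Char × List Char × Int) (i : Char) =>
      if i = '[' then (st.1 ++ [' '], st.2.1, st.2.2 + 1)
      else if i = ']' then (st.1, st.2.1 ++ [' '], st.2.2 - 1)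
      else if st.2.2 = 0 then (st.1 ++ [i], st.2.1, st.2.2)
      else (st.1, st.2.1 ++ [i], st.2.2)) = pvStep from rfl]
  simp [h1, h2, pvReal, pvHyper]
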